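-- pv_equiv track=rewrite | github.com/guckstift/population | scripts/bundle-source.py | codevar
-- ===== SOURCE A (Python) =====
-- alnums = list("abcdefghijklmnopqrstuvwxyzABCDEFGHIJKLMNOPQRSTUVWXYZ0123456789_")
--
-- def codevar(n):
-- 	res = ""
-- 	while n > 0:
-- 		res += alnums[n % 52]
-- 		n //= 52
-- 	if res == "":
-- 		res = "a"
-- 	if res == "if":
-- 		res += "_"
-- 	return res
-- ===== SOURCE B (Python) =====
-- ALPHA = "abcdefghijklmnopqrstuvwxyzABCDEFGHIJKLMNOPQRSTUVWXYZ"
--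
-- def codevar(n):
--     # count base-52 digits of n: smallest k with 52**k > n
--     k, p = 0, 1
--     while p <= n:
--         k += 1
--         p *= 52
--     # extract digit i positionally, least-significant first
--     res = "".join(ALPHA[n // 52 ** i % 52] for i in range(k))
--     if res == "":
--         res = "a"
--     if res == "if":
--         res += "_"
--     return res
-- ===== Notes on version B (the rewrite author's own statement) =====
-- stated objective: alternative
-- what changed: Replaces A's single repeated-division loop that mutates n while accumulating characters by a two-stage positional conversion: a power loop first counts the base-52 digits k, then each digit is extracted independently as n // 52**i % 52 over range(k) and joined.
import Mathlib
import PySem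

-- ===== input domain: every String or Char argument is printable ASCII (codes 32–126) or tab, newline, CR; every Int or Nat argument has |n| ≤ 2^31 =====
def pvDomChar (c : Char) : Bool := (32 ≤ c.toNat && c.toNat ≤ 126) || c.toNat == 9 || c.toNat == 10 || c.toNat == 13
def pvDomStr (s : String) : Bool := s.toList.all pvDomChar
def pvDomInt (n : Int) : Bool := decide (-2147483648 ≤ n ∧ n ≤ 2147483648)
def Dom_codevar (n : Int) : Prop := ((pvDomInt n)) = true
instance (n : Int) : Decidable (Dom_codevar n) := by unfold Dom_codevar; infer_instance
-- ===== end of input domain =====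

-- B replaces A's repeated-division accumulator loop by a two-stage positional
-- conversion: first count the base-52 digits with a power loop, then extract
-- digit i directly as n // 52**i % 52 over range(k) (objective: alternative).

-- ===== PORT A =====
def pvAlnums : List Char :=
  "abcdefghijklmnopqrstuvwxyzABCDEFGHIJKLMNOPQRSTUVWXYZ0123456789_".toList

def codevarLoop (n : Int) (res : String) : String :=
  if 0 < n then
    codevarLoop (PySem.Int.floordiv n 52)
      (res ++ String.ofList [PySem.List.pyGetD pvAlnums (PySem.Int.mod n 52) 'a'])
  else res
termination_by n.toNat
decreasing_by
  rename_i h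
  rw [PySem.Int.floordiv_eq_ediv_of_pos (by omega)]
  omega

def codevar (n : Int) : String :=
  let res := codevarLoop n ""
  let res := if res = "" then "a" else res
  if res = "if" then res ++ "_" else res

-- ===== PORT B =====
def pvAlpha : List Char :=
  "abcdefghijklmnopqrstuvwxyzABCDEFGHIJKLMNOPQRSTUVWXYZ".toList

-- `while p <= n: k += 1; p *= 52` — p is 52^k, kept as a Nat; the 0-branch is a
-- totality guard only (p starts at 1 and only grows).
def pvCount (n : Int) (k : Nat) (p : Nat) : Nat :=
  match p with
  | 0 => k
  | q + 1 => if ((q + 1 : Nat) : Int) ≤ n then pvCount n (k + 1) ((q + 1) * 52) else k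
termination_by (n + 1 - p).toNat
decreasing_by
  rename_i hle
  omega

-- one term of the generator: ALPHA[n // 52 ** i % 52]
def pvDigitChar (n : Int) (i : Nat) : Char :=
  PySem.List.pyGetD pvAlpha (PySem.Int.mod (PySem.Int.floordiv n ((52 : Int) ^ i)) 52) 'a'

def codevar_alt (n : Int) : String :=
  let k := pvCount n 0 1
  let res := String.ofList ((List.range k).map (pvDigitChar n))
  let res := if res = "" then "a" else res
  if res = "if" then res ++ "_" else res

-- ===== PRECONDITION & SPEC =====
def Spec_codevar (n : Int) (out : String) : Prop := out = codevar_alt n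
instance (n : Int) (out : String) : Decidable (Spec_codevar n out) := by unfold Spec_codevar; infer_instance

-- ===== CLAIM (what is proved, stated in full; the proofs are below) =====
def Claim_equal_codevar : Prop := ∀ (n : Int), Dom_codevar n → Spec_codevar n (codevar n)

-- ===== LEMMAS AND PROOFS =====

-- mathematical digit count, recursion on the value
def nDigits (n : Int) : Nat :=
  if 0 < n then nDigits (n / 52) + 1 else 0
termination_by n.toNat
decreasing_by
  rename_i h
  omega

-- A's digit characters, least-significant first
def aChars (n : Int) : List Char :=
  if 0 < n then
    PySem.List.pyGetD pvAlnums (PySem.Int.mod n 52) 'a' :: aChars (PySem.Int.floordiv n 52)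
  else []
termination_by n.toNat
decreasing_by
  rename_i h
  rw [PySem.Int.floordiv_eq_ediv_of_pos (by omega)]
  omega

lemma mod52_bounds (n : Int) : 0 ≤ PySem.Int.mod n 52 ∧ PySem.Int.mod n 52 < 52 := by
  rw [PySem.Int.mod_eq_emod_of_pos (by omega)]
  exact ⟨Int.emod_nonneg n (by omega), Int.emod_lt_of_pos n (by omega)⟩

-- A's 62-entry table agrees with B's 52-char digit string on indices below 52
lemma digit_eq (i : Int) (h0 : 0 ≤ i) (h1 : i < 52) :
    PySem.List.pyGetD pvAlnums i 'a' = PySem.List.pyGetD pvAlpha i 'a' := by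
  rw [PySem.List.pyGetD_eq_getElem pvAlnums 'a' h0 (by simp [pvAlnums]; omega),
      PySem.List.pyGetD_eq_getElem pvAlpha 'a' h0 (by simp [pvAlpha]; omega)]
  have : pvAlnums = pvAlpha ++ "0123456789_".toList := by decide
  simp only [this]
  exact List.getElem_append_left (by simp [pvAlpha]; omega)

lemma loop_eq (n : Int) (res : String) :
    codevarLoop n res = res ++ String.ofList (aChars n) := by
  rw [codevarLoop, aChars]
  split
  · rw [loop_eq, String.append_assoc, ← String.ofList_append]
    rfl
  · simp
termination_by n.toNat
decreasing_by
  rw [PySem.Int.floordiv_eq_ediv_of_pos (by omega)]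
  omega

lemma count_eq (n : Int) (k p : Nat) (hp : 1 ≤ p) :
    pvCount n k p = k + nDigits (n / (p : Int)) := by
  obtain ⟨q, rfl⟩ : ∃ q, p = q + 1 := ⟨p - 1, by omega⟩
  rw [pvCount]
  split
  · rename_i hle
    rw [count_eq n (k + 1) ((q + 1) * 52) (by omega)]
    have hpos : (0 : Int) < ((q + 1 : Nat) : Int) := by exact_mod_cast Nat.succ_pos q
    have hq : 0 < n / ((q + 1 : Nat) : Int) := by
      have h1 := (Int.le_ediv_iff_mul_le hpos).mpr
        (show (1 : Int) * ((q + 1 : Nat) : Int) ≤ n by omega)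
      omega
    conv_rhs => rw [nDigits]
    rw [if_pos hq]
    have harg : (((q + 1) * 52 : Nat) : Int) = ((q + 1 : Nat) : Int) * 52 := by push_cast; ring
    rw [harg, ← Int.ediv_ediv_of_nonneg (le_of_lt hpos)]
    omega
  · rename_i hlt
    have hle0 : n / ((q + 1 : Nat) : Int) ≤ 0 := by
      rcases le_or_gt 0 n with hn | hn
      · rw [Int.ediv_eq_zero_of_lt hn (by omega)]
      · calc n / ((q + 1 : Nat) : Int) ≤ 0 / ((q + 1 : Nat) : Int) :=
              Int.ediv_le_ediv (by exact_mod_cast Nat.succ_pos q) (by omega)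
          _ = 0 := Int.zero_ediv _
    rw [nDigits, if_neg (by omega)]
    omega
termination_by (n + 1 - p).toNat
decreasing_by omega

lemma head_eq (n : Int) :
    PySem.List.pyGetD pvAlnums (PySem.Int.mod n 52) 'a' = pvDigitChar n 0 := by
  rw [digit_eq _ (mod52_bounds n).1 (mod52_bounds n).2]
  simp [pvDigitChar]

lemma step_eq (n : Int) (i : Nat) : pvDigitChar (n / 52) i = pvDigitChar n (i + 1) := by
  simp only [pvDigitChar]
  congr 2
  rw [PySem.Int.floordiv_eq_ediv_of_pos (show (0:Int) < (52:Int) ^ i by positivity),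
      PySem.Int.floordiv_eq_ediv_of_pos (show (0:Int) < (52:Int) ^ (i + 1) by positivity),
      Int.ediv_ediv_of_nonneg (by omega : (0:Int) ≤ 52), ← pow_succ']

lemma aChars_eq (n : Int) : aChars n = (List.range (nDigits n)).map (pvDigitChar n) := by
  by_cases h : 0 < n
  · have hfd : PySem.Int.floordiv n 52 = n / 52 :=
      PySem.Int.floordiv_eq_ediv_of_pos (by omega)
    rw [aChars, if_pos h, nDigits, if_pos h, hfd, aChars_eq (n / 52),
        List.range_succ_eq_map, List.map_cons, List.map_map]
    exact List.cons_eq_cons.mpr ⟨head_eq n, List.map_congr_left fun i _ => step_eq n i⟩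
  · rw [aChars, if_neg h, nDigits, if_neg h]
    simp
termination_by n.toNat
decreasing_by omega

-- ===== VERDICT (by name: the statement is the Claim_ definition above) =====
theorem codevar_spec : Claim_equal_codevar := by
  intro n _
  unfold Spec_codevar codevar codevar_alt
  rw [loop_eq, count_eq n 0 1 (by omega), aChars_eq]
  simp
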